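-- pv_equiv track=rewrite | github.com/Nirb8/aoc2024 | day8/part2.py | get_unique_pairs
-- ===== SOURCE A (Python) =====
-- def get_unique_pairs(pairs_list):
--     pair_pairs = []
--     for pair in pairs_list :
--         for pair_two in pairs_list :
--             current_pair = (pair, pair_two)
--             if (current_pair not in pair_pairs and (current_pair[0], current_pair[1]) not in pair_pairs):
--                 pair_pairs.append(current_pair)
--     return pair_pairs
-- ===== SOURCE B (Python) =====
-- def get_unique_pairs(pairs_list):
--     unique = []
--     for x in pairs_list:
--         if x not in unique:
--             unique.append(x)
--     return [(p, q) for p in unique for q in unique]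
-- ===== Notes on version B (the rewrite author's own statement) =====
-- stated objective: faster
-- what changed: Dedupe the elements once up front (first-appearance order) and emit the Cartesian product, instead of testing every generated pair against all previously emitted pairs.
import Mathlib
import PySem

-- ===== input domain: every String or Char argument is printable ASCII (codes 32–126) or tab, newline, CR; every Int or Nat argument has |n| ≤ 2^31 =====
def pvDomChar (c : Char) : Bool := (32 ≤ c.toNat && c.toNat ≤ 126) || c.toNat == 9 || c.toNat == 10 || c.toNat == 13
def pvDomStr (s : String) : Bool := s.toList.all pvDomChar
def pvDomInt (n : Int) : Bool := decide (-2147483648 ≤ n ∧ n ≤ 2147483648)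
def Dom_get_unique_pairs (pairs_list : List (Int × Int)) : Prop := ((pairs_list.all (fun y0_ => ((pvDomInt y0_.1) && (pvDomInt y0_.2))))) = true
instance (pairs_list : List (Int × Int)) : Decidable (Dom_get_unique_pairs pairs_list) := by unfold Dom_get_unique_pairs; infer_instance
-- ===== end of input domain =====

-- B dedupes the elements once up front and emits the Cartesian product, instead of
-- testing every generated pair against all previously emitted pairs (faster).

-- ===== PORT A =====
-- the body of A's inner loop: append (pair, pair_two) unless already present
-- (A's condition tests the same pair twice; ported literally)
def pvStepA (pair : Int × Int) (pair_pairs : List ((Int × Int) × (Int × Int)))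
    (pair_two : Int × Int) : List ((Int × Int) × (Int × Int)) :=
  let current_pair := (pair, pair_two)
  if current_pair ∉ pair_pairs ∧ (current_pair.1, current_pair.2) ∉ pair_pairs then
    pair_pairs ++ [current_pair]
  else pair_pairs

def get_unique_pairs (pairs_list : List (Int × Int)) : List ((Int × Int) × (Int × Int)) :=
  pairs_list.foldl (fun pair_pairs pair => pairs_list.foldl (pvStepA pair) pair_pairs) []

-- ===== PORT B =====
-- list-based dedup of the elements, first-appearance order (B's `if x not in unique`)
def pvAdd (u : List (Int × Int)) (x : Int × Int) : List (Int × Int) :=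
  if x ∈ u then u else u ++ [x]

def get_unique_pairs_alt (pairs_list : List (Int × Int)) : List ((Int × Int) × (Int × Int)) :=
  let unique := pairs_list.foldl pvAdd []
  unique.flatMap (fun p => unique.map (fun q => (p, q)))

-- ===== PRECONDITION & SPEC =====
def Spec_get_unique_pairs (pairs_list : List (Int × Int)) (out : List ((Int × Int) × (Int × Int))) : Prop := out = get_unique_pairs_alt pairs_list
instance (pairs_list : List (Int × Int)) (out : List ((Int × Int) × (Int × Int))) : Decidable (Spec_get_unique_pairs pairs_list out) := by unfold Spec_get_unique_pairs; infer_instance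

-- ===== CLAIM (what is proved, stated in full; the proofs are below) =====
def Claim_equal_get_unique_pairs : Prop := ∀ (pairs_list : List (Int × Int)), Dom_get_unique_pairs pairs_list → Spec_get_unique_pairs pairs_list (get_unique_pairs pairs_list)

-- ===== LEMMAS AND PROOFS =====

-- membership in the running dedup accumulator
theorem pv_mem_foldl_add (xs : List (Int × Int)) (u : List (Int × Int)) (a : Int × Int) :
    a ∈ xs.foldl pvAdd u ↔ a ∈ u ∨ a ∈ xs := by
  induction xs generalizing u with
  | nil => simp
  | cons x xs ih =>
    simp only [List.foldl_cons, pvAdd]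
    split_ifs with h
    · rw [ih]
      simp only [List.mem_cons]
      constructor
      · rintro (h1 | h1)
        · exact Or.inl h1
        · exact Or.inr (Or.inr h1)
      · rintro (h1 | h1 | h1)
        · exact Or.inl h1
        · exact Or.inl (h1 ▸ h)
        · exact Or.inr h1
    · rw [ih]
      simp only [List.mem_append, List.mem_cons]
      tauto

-- inner loop over a fresh outer element p: appends (p, ·) for each newly seen q
theorem pv_inner_fresh (ys : List (Int × Int)) (acc0 : List ((Int × Int) × (Int × Int)))
    (u : List (Int × Int)) (p : Int × Int) (h0 : ∀ q, (p, q) ∉ acc0) :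
    ys.foldl (pvStepA p) (acc0 ++ u.map (fun q => (p, q))) =
      acc0 ++ (ys.foldl pvAdd u).map (fun q => (p, q)) := by
  induction ys generalizing u with
  | nil => simp
  | cons y ys ih =>
    have hmem : ((p, y) ∈ acc0 ++ u.map (fun q => (p, q))) ↔ y ∈ u := by
      simp only [List.mem_append, List.mem_map]
      constructor
      · rintro (h' | ⟨q, hq, hpq⟩)
        · exact absurd h' (h0 y)
        · cases hpq; exact hq
      · intro h'; exact Or.inr ⟨y, h', rfl⟩
    simp only [List.foldl_cons, pvStepA, pvAdd]
    by_cases hy : y ∈ u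
    · split_ifs with h
      · exact absurd (hmem.mpr hy) h.1
      · exact ih u
    · have hnotin : (p, y) ∉ acc0 ++ u.map (fun q => (p, q)) := fun h' => hy (hmem.mp h')
      split_ifs with h
      · have heq : acc0 ++ u.map (fun q => (p, q)) ++ [(p, y)] =
            acc0 ++ (u ++ [y]).map (fun q => (p, q)) := by simp
        rw [heq]
        exact ih (u ++ [y])
      · exact absurd ⟨hnotin, hnotin⟩ h

-- inner loop over an already-processed outer element p: no change
theorem pv_inner_dup (ys : List (Int × Int)) (acc : List ((Int × Int) × (Int × Int)))
    (p : Int × Int) (h : ∀ q ∈ ys, (p, q) ∈ acc) :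
    ys.foldl (pvStepA p) acc = acc := by
  induction ys with
  | nil => rfl
  | cons y ys ih =>
    simp only [List.foldl_cons, pvStepA]
    rw [if_neg (by simp [h y (by simp)])]
    exact ih (fun q hq => h q (by simp [hq]))

-- the outer loop maintains: accumulator = (dedup of prefix) × (dedup of the whole list)
theorem pv_outer (xs ys u D : List (Int × Int)) (hD : xs.foldl pvAdd [] = D)
    (hsub : ∀ q ∈ xs, q ∈ D) :
    ys.foldl (fun acc p => xs.foldl (pvStepA p) acc)
        (u.flatMap (fun p => D.map (fun q => (p, q)))) =
      (ys.foldl pvAdd u).flatMap (fun p => D.map (fun q => (p, q))) := by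
  induction ys generalizing u with
  | nil => rfl
  | cons p ys ih =>
    simp only [List.foldl_cons]
    by_cases hp : p ∈ u
    · have hmemall : ∀ q ∈ xs, (p, q) ∈ u.flatMap (fun p' => D.map (fun q' => (p', q'))) :=
        fun q hq => List.mem_flatMap.mpr ⟨p, hp, List.mem_map.mpr ⟨q, hsub q hq, rfl⟩⟩
      rw [pv_inner_dup xs _ p hmemall, show pvAdd u p = u by simp [pvAdd, hp]]
      exact ih u
    · have h0 : ∀ q, (p, q) ∉ u.flatMap (fun p' => D.map (fun q' => (p', q'))) := by
        intro q hmem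
        obtain ⟨p', hp', hm⟩ := List.mem_flatMap.mp hmem
        obtain ⟨q', _, heq⟩ := List.mem_map.mp hm
        cases heq
        exact hp hp'
      have hfresh := pv_inner_fresh xs
        (u.flatMap (fun p' => D.map (fun q' => (p', q')))) [] p h0
      rw [List.map_nil, List.append_nil, hD] at hfresh
      have hG : u.flatMap (fun p' => D.map (fun q' => (p', q'))) ++
          D.map (fun q => (p, q)) =
          (u ++ [p]).flatMap (fun p' => D.map (fun q' => (p', q'))) := by simp
      rw [hfresh, hG, show pvAdd u p = u ++ [p] by simp [pvAdd, hp]]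
      exact ih (u ++ [p])

-- ===== VERDICT (by name: the statement is the Claim_ definition above) =====
theorem get_unique_pairs_spec : Claim_equal_get_unique_pairs := by
  intro xs _
  show get_unique_pairs xs = get_unique_pairs_alt xs
  unfold get_unique_pairs get_unique_pairs_alt
  have := pv_outer xs xs [] (xs.foldl pvAdd []) rfl
    (fun q hq => (pv_mem_foldl_add xs [] q).mpr (Or.inr hq))
  simpa using this
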